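-- pv_equiv track=rewrite | github.com/dawitys/Leetcode-Questions | q4.py | underlineCount
-- ===== SOURCE A (Python) =====
-- def underlineCount(word):
--     count = 0
--     prev = -1
--     for i in range(len(word)):
--         if(word[i] =="w"):
--             count += 1
--         elif(prev == "v"):
--             count += 1
--             prev = -1
--             continue
--         prev = word[i]
--
--     return count
-- ===== SOURCE B (Python) =====
-- def underlineCount(word):
--     # Two-pointer scan: count 'w' chars, and non-overlapping "'v' then a non-'w' char" pairs.
--     n = len(word)
--     count = 0
--     i = 0
--     while i < n:
--         if word[i] == "w":
--             count += 1
--             i += 1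
--         elif word[i] == "v" and i + 1 < n and word[i + 1] != "w":
--             count += 1
--             i += 2
--         else:
--             i += 1
--     return count
-- ===== Notes on version B (the rewrite author's own statement) =====
-- stated objective: alternative
-- what changed: Replaces the state-machine scan carrying a prev variable with a stateless two-pointer scan that looks one character ahead and jumps the index by 2 over each matched 'v'+non-'w' pair.
import Mathlib
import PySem

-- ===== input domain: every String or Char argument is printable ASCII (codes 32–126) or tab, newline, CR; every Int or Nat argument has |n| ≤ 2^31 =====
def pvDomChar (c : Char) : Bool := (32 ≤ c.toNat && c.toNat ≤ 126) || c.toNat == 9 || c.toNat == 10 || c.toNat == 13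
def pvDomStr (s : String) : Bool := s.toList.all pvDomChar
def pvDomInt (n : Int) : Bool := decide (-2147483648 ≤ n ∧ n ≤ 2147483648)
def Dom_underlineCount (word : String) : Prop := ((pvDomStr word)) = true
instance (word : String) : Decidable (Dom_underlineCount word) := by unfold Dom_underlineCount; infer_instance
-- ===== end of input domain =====

-- B replaces A's prev-state scan with a stateless two-pointer scan that looks one character ahead (objective: alternative, same O(n) cost).


-- ===== PORT A =====
-- A's for-loop over word, carrying (count, prev); prev = -1 is modelled as none.
def underlineCountStep (st : Int × Option Char) (c : Char) : Int × Option Char :=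
  if c = 'w' then (st.1 + 1, some c)
  else if st.2 = some 'v' then (st.1 + 1, none)
  else (st.1, some c)

def underlineCount (word : String) : Int :=
  (word.toList.foldl underlineCountStep (0, none)).1

-- ===== PORT B =====
-- B's while-loop advancing i by 1 or 2, transcribed as recursion consuming 1 or 2 chars.
def underlineCountGo : List Char → Int
  | [] => 0
  | [c] => if c = 'w' then 1 else 0
  | c :: d :: t =>
    if c = 'w' then 1 + underlineCountGo (d :: t)
    else if c = 'v' ∧ d ≠ 'w' then 1 + underlineCountGo t
    else underlineCountGo (d :: t)

def underlineCount_alt (word : String) : Int := underlineCountGo word.toList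

-- ===== PRECONDITION & SPEC =====
def Spec_underlineCount (word : String) (out : Int) : Prop := out = underlineCount_alt word
instance (word : String) (out : Int) : Decidable (Spec_underlineCount word out) := by unfold Spec_underlineCount; infer_instance

-- ===== CLAIM (what is proved, stated in full; the proofs are below) =====
def Claim_equal_underlineCount : Prop := ∀ (word : String), Dom_underlineCount word → Spec_underlineCount word (underlineCount word)

-- ===== LEMMAS AND PROOFS =====

-- value of B's scan when a pending 'v' precedes the list
def underlineCountGoV : List Char → Int
  | [] => 0
  | c :: t => if c ≠ 'w' then 1 + underlineCountGo t else underlineCountGo (c :: t)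

def underlineCountGoP (p : Option Char) (l : List Char) : Int :=
  if p = some 'v' then underlineCountGoV l else underlineCountGo l

lemma underlineCount_loop (l : List Char) : ∀ (k : Int) (p : Option Char),
    (l.foldl underlineCountStep (k, p)).1 = k + underlineCountGoP p l := by
  induction l with
  | nil => intro k p; simp [underlineCountGoP, underlineCountGoV, underlineCountGo]
  | cons c t ih =>
    intro k p
    simp only [List.foldl_cons, underlineCountStep]
    by_cases hw : c = 'w'
    · subst hw
      rw [if_pos rfl, ih]
      have hgo : underlineCountGoP (some 'w') t = underlineCountGo t := by
        simp [underlineCountGoP]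
      rw [hgo]
      cases t with
      | nil => simp [underlineCountGoP, underlineCountGoV, underlineCountGo]
      | cons d t' =>
        simp [underlineCountGoP, underlineCountGoV, underlineCountGo]
        ring
    · by_cases hv : p = some 'v'
      · subst hv
        rw [if_neg hw, if_pos rfl, ih]
        have : underlineCountGoP none t = underlineCountGo t := by simp [underlineCountGoP]
        rw [this]
        simp [underlineCountGoP, underlineCountGoV, hw]
        ring
      · simp only [if_neg hw, if_neg hv, ih]
        rw [show underlineCountGoP p (c :: t) = underlineCountGo (c :: t) by
          simp [underlineCountGoP, hv]]
        by_cases hcv : c = 'v'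
        · subst hcv
          cases t with
          | nil => simp [underlineCountGoP, underlineCountGoV, underlineCountGo, hw]
          | cons d t' =>
            by_cases hd : d = 'w'
            · simp [underlineCountGoP, underlineCountGoV, underlineCountGo, hd, hw]
            · simp [underlineCountGoP, underlineCountGoV, underlineCountGo, hd, hw]
        · have : underlineCountGoP (some c) t = underlineCountGo t := by
            simp [underlineCountGoP, hcv]
          rw [this]
          cases t with
          | nil => simp [underlineCountGo, hw]
          | cons d t' => simp [underlineCountGo, hw, hcv]

-- ===== VERDICT (by name: the statement is the Claim_ definition above) =====
theorem underlineCount_spec : Claim_equal_underlineCount := by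
  intro word _
  unfold Spec_underlineCount underlineCount underlineCount_alt
  rw [underlineCount_loop]
  simp [underlineCountGoP]
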